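-- pv_equiv track=rewrite | github.com/stanfordnlp/dspy | test_before_pypi/lib/python3.9/site-packages/litellm/router_utils/pattern_match_deployments.py | calculate_pattern_specificity
-- ===== SOURCE A (Python) =====
-- from typing import Dict, List, Optional, Tuple
--
-- def calculate_pattern_specificity(pattern: str) -> Tuple[int, int]:
--     """
--     Calculate pattern specificity based on length and complexity.
--
--     Args:
--         pattern: Regex pattern to analyze
--
--     Returns:
--         Tuple of (length, complexity) for sorting
--     """
--     complexity_chars = ["*", "+", "?", "\\", "^", "$", "|", "(", ")"]
--     ret_val = (
--         len(pattern),  # Longer patterns more specific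
--         sum(
--             pattern.count(char) for char in complexity_chars
--         ),  # More regex complexity
--     )
--     return ret_val
-- ===== SOURCE B (Python) =====
-- def calculate_pattern_specificity(pattern: str):
--     """One pass over the pattern, membership in a set of the 9 special chars."""
--     specials = {"*", "+", "?", "\\", "^", "$", "|", "(", ")"}
--     complexity = 0
--     for c in pattern:
--         if c in specials:
--             complexity += 1
--     return (len(pattern), complexity)
-- ===== Notes on version B (the rewrite author's own statement) =====
-- stated objective: simpler
-- what changed: Replaces A's nine pattern.count scans (one full scan of the pattern per special character) with a single pass over the pattern that counts characters belonging to a 9-element special-character set.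
import Mathlib
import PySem

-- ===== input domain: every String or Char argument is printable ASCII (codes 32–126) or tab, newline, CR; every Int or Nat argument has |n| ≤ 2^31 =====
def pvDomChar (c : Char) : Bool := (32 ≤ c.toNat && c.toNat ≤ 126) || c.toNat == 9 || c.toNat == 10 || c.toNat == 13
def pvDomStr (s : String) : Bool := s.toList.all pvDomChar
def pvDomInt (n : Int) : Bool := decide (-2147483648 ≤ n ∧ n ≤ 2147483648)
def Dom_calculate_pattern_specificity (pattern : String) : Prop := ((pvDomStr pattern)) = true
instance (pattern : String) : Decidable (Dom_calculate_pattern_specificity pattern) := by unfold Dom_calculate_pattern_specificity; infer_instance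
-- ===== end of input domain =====

-- B replaces A's nine per-special-character scans of the pattern with one pass over
-- the pattern testing membership in the set of special characters (objective: simpler).

-- ===== PORT A =====
def calculate_pattern_specificity (pattern : String) : Int × Int :=
  let complexity_chars : List String := ["*", "+", "?", "\\", "^", "$", "|", "(", ")"]
  ((PySem.Str.len pattern : Int),
   (complexity_chars.map (fun ch => (PySem.Str.count pattern ch : Int))).sum)

-- ===== PORT B =====
def calculate_pattern_specificity_alt (pattern : String) : Int × Int :=
  let specials : PySem.Set Char := PySem.Set.ofList ['*', '+', '?', '\\', '^', '$', '|', '(', ')']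
  ((PySem.Str.len pattern : Int),
   pattern.toList.foldl
     (fun acc c => if PySem.Set.contains specials c then acc + 1 else acc) (0 : Int))

-- ===== PRECONDITION & SPEC =====
def Spec_calculate_pattern_specificity (pattern : String) (out : Int × Int) : Prop := out = calculate_pattern_specificity_alt pattern
instance (pattern : String) (out : Int × Int) : Decidable (Spec_calculate_pattern_specificity pattern out) := by unfold Spec_calculate_pattern_specificity; infer_instance

-- ===== CLAIM (what is proved, stated in full; the proofs are below) =====
def Claim_equal_calculate_pattern_specificity : Prop := ∀ (pattern : String), Dom_calculate_pattern_specificity pattern → Spec_calculate_pattern_specificity pattern (calculate_pattern_specificity pattern)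

-- ===== LEMMAS AND PROOFS =====

-- Chars.count with a single-character needle is List.count.
theorem pv_go_single (c : Char) : ∀ (l : List Char) (fuel acc : Nat), l.length ≤ fuel →
    PySem.Chars.count.go [c] fuel l acc = acc + l.count c := by
  intro l
  induction l with
  | nil => intro fuel acc h; cases fuel <;> simp [PySem.Chars.count.go]
  | cons x t ih =>
    intro fuel acc h
    simp at h
    cases fuel with
    | zero => omega
    | succ n =>
      rw [PySem.Chars.count.go]
      by_cases hx : x = c
      · subst hx
        simp [List.isPrefixOf, ih n (acc + 1) (by omega)]
        omega
      · simp [List.isPrefixOf, Ne.symm hx, ih n acc (by omega), hx]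

theorem pv_str_count_single (s t : String) (c : Char) (h : t.toList = [c]) :
    PySem.Str.count s t = s.toList.count c := by
  rw [PySem.Str.count_eq, h, PySem.Chars.count]
  simp only [List.isEmpty_cons, Bool.false_eq_true, if_false]
  rw [pv_go_single c s.toList s.toList.length 0 le_rfl]
  omega

theorem pv_sum_map_add (cs : List Char) (f g : Char → Nat) :
    (cs.map (fun c => f c + g c)).sum = (cs.map f).sum + (cs.map g).sum := by
  induction cs with
  | nil => simp
  | cons y ys ih => simp [List.map_cons, List.sum_cons, ih]; omega

theorem pv_count_in_nodup (x : Char) : ∀ (cs : List Char), cs.Nodup →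
    (cs.map (fun c => if x = c then 1 else 0)).sum = (if cs.contains x then 1 else 0) := by
  intro cs
  induction cs with
  | nil => simp
  | cons y ys ih =>
    intro h
    simp only [List.nodup_cons] at h
    rw [List.map_cons, List.sum_cons, ih h.2, List.contains_cons]
    by_cases hy : x = y
    · subst hy
      cases hcc : ys.contains x with
      | false => simp
      | true => exact absurd (by simpa using hcc) h.1
    · simp [hy]

-- Sum over a duplicate-free char list of per-char counts = one countP over l.
theorem pv_sum_counts (cs : List Char) (h : cs.Nodup) (l : List Char) :
    (cs.map (fun c => l.count c)).sum = l.countP cs.contains := by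
  induction l with
  | nil => simp
  | cons x t ih =>
    have hc : ∀ c : Char, (x :: t).count c = t.count c + (if x = c then 1 else 0) := by
      intro c
      rw [List.count_cons]
      by_cases hcx : c = x
      · simp [hcx]
      · simp [Ne.symm hcx]
    simp only [hc]
    rw [pv_sum_map_add, ih, pv_count_in_nodup x cs h, List.countP_cons]

-- ===== VERDICT (by name: the statement is the Claim_ definition above) =====
theorem calculate_pattern_specificity_spec : Claim_equal_calculate_pattern_specificity := by
  intro pattern _
  unfold Spec_calculate_pattern_specificity calculate_pattern_specificity calculate_pattern_specificity_alt
  have hset : PySem.Set.ofList ['*', '+', '?', '\\', '^', '$', '|', '(', ')']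
      = ['*', '+', '?', '\\', '^', '$', '|', '(', ')'] := by decide
  refine Prod.ext rfl ?_
  simp only [hset, PySem.List.foldl_if_add_one, PySem.Set.contains_eq_listContains,
    List.map_cons, List.map_nil, List.sum_cons, List.sum_nil]
  rw [pv_str_count_single pattern "*" '*' rfl, pv_str_count_single pattern "+" '+' rfl,
      pv_str_count_single pattern "?" '?' rfl, pv_str_count_single pattern "\\" '\\' rfl,
      pv_str_count_single pattern "^" '^' rfl, pv_str_count_single pattern "$" '$' rfl,
      pv_str_count_single pattern "|" '|' rfl, pv_str_count_single pattern "(" '(' rfl,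
      pv_str_count_single pattern ")" ')' rfl]
  have h2 := congrArg (Nat.cast : Nat → Int)
    (pv_sum_counts ['*', '+', '?', '\\', '^', '$', '|', '(', ')'] (by decide) pattern.toList)
  simp only [List.map_cons, List.map_nil, List.sum_cons, List.sum_nil] at h2
  push_cast at h2 ⊢
  omega
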